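-- pv_equiv track=rewrite | github.com/Foundup/Foundups-Agent | WSP_agentic/tests/systems_assessment.py | _identify_transition_trigger
-- ===== SOURCE A (Python) =====
-- def _identify_transition_trigger(preceding_states):
--     """Identify what triggered the 01/02 → 0102 transition"""
--     events = [s[3] for s in preceding_states]
--
--     # Check for specific trigger patterns
--     if any('Temporal resonance' in event for event in events):
--         return "TEMPORAL_RESONANCE"
--     elif any('Latency resonance' in event for event in events):
--         return "LATENCY_RESONANCE"
--     elif any('Operator' in event for event in events):
--         return "OPERATOR_INJECTION"
--     elif any('Rendering' in event for event in events):
--         return "RENDERING_STABILITY"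
--     else:
--         return "QUANTUM_ACCUMULATION"
-- ===== SOURCE B (Python) =====
-- def _identify_transition_trigger(preceding_states):
--     """Identify what triggered the 01/02 -> 0102 transition (single-pass flag version)"""
--     has_temporal = has_latency = has_operator = has_rendering = False
--     for s in preceding_states:
--         event = s[3]
--         if 'Temporal resonance' in event:
--             has_temporal = True
--         if 'Latency resonance' in event:
--             has_latency = True
--         if 'Operator' in event:
--             has_operator = True
--         if 'Rendering' in event:
--             has_rendering = True
--     if has_temporal:
--         return "TEMPORAL_RESONANCE"
--     if has_latency:
--         return "LATENCY_RESONANCE"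
--     if has_operator:
--         return "OPERATOR_INJECTION"
--     if has_rendering:
--         return "RENDERING_STABILITY"
--     return "QUANTUM_ACCUMULATION"
-- ===== Notes on version B (the rewrite author's own statement) =====
-- stated objective: alternative
-- what changed: Replaces four priority-ordered any() scans over a materialised events list with a single pass that accumulates four boolean flags, followed by a separate decision block.
import Mathlib
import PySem

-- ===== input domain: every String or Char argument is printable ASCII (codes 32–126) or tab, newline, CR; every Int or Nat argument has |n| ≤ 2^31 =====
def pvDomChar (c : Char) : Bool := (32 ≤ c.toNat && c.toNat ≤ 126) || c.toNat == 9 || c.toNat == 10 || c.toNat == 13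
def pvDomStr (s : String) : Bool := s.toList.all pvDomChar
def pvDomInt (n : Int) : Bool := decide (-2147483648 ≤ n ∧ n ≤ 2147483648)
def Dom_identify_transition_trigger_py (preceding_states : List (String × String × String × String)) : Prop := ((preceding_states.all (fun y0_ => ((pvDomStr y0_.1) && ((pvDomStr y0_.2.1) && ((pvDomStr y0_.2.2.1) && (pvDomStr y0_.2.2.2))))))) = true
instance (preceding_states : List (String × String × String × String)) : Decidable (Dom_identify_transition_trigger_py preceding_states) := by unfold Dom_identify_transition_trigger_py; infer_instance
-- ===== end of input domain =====

-- ===== PORT A =====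
-- Port of A: build the events list, then four priority-ordered any() scans.
def identify_transition_trigger_py (preceding_states : List (String × String × String × String)) : String :=
  let events := preceding_states.map (fun s => s.2.2.2)
  if events.any (fun event => PySem.Str.isIn "Temporal resonance" event) then "TEMPORAL_RESONANCE"
  else if events.any (fun event => PySem.Str.isIn "Latency resonance" event) then "LATENCY_RESONANCE"
  else if events.any (fun event => PySem.Str.isIn "Operator" event) then "OPERATOR_INJECTION"
  else if events.any (fun event => PySem.Str.isIn "Rendering" event) then "RENDERING_STABILITY"
  else "QUANTUM_ACCUMULATION"

-- ===== PORT B =====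
-- Port of B: one fold accumulating four boolean flags, then a separate decision block.
def pvFlags (preceding_states : List (String × String × String × String)) : Bool × Bool × Bool × Bool :=
  preceding_states.foldl
    (fun f s =>
      let event := s.2.2.2
      (f.1 || PySem.Str.isIn "Temporal resonance" event,
       f.2.1 || PySem.Str.isIn "Latency resonance" event,
       f.2.2.1 || PySem.Str.isIn "Operator" event,
       f.2.2.2 || PySem.Str.isIn "Rendering" event))
    (false, false, false, false)

def identify_transition_trigger_py_alt (preceding_states : List (String × String × String × String)) : String :=
  let f := pvFlags preceding_states
  if f.1 then "TEMPORAL_RESONANCE"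
  else if f.2.1 then "LATENCY_RESONANCE"
  else if f.2.2.1 then "OPERATOR_INJECTION"
  else if f.2.2.2 then "RENDERING_STABILITY"
  else "QUANTUM_ACCUMULATION"

-- ===== PRECONDITION & SPEC =====
def Spec_identify_transition_trigger_py (preceding_states : List (String × String × String × String)) (out : String) : Prop := out = identify_transition_trigger_py_alt preceding_states
instance (preceding_states : List (String × String × String × String)) (out : String) : Decidable (Spec_identify_transition_trigger_py preceding_states out) := by unfold Spec_identify_transition_trigger_py; infer_instance

-- ===== CLAIM (what is proved, stated in full; the proofs are below) =====
def Claim_equal_identify_transition_trigger_py : Prop := ∀ (preceding_states : List (String × String × String × String)), Dom_identify_transition_trigger_py preceding_states → Spec_identify_transition_trigger_py preceding_states (identify_transition_trigger_py preceding_states)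

-- ===== LEMMAS AND PROOFS =====

-- The fold of B computes exactly the four any-scans of A.
theorem pvFlags_eq (ps : List (String × String × String × String)) :
    pvFlags ps =
      (ps.any (fun s => PySem.Str.isIn "Temporal resonance" s.2.2.2),
       ps.any (fun s => PySem.Str.isIn "Latency resonance" s.2.2.2),
       ps.any (fun s => PySem.Str.isIn "Operator" s.2.2.2),
       ps.any (fun s => PySem.Str.isIn "Rendering" s.2.2.2)) := by
  suffices h : ∀ f : Bool × Bool × Bool × Bool,
      ps.foldl
        (fun f s =>
          (f.1 || PySem.Str.isIn "Temporal resonance" s.2.2.2,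
           f.2.1 || PySem.Str.isIn "Latency resonance" s.2.2.2,
           f.2.2.1 || PySem.Str.isIn "Operator" s.2.2.2,
           f.2.2.2 || PySem.Str.isIn "Rendering" s.2.2.2)) f =
      (f.1 || ps.any (fun s => PySem.Str.isIn "Temporal resonance" s.2.2.2),
       f.2.1 || ps.any (fun s => PySem.Str.isIn "Latency resonance" s.2.2.2),
       f.2.2.1 || ps.any (fun s => PySem.Str.isIn "Operator" s.2.2.2),
       f.2.2.2 || ps.any (fun s => PySem.Str.isIn "Rendering" s.2.2.2)) by
    simpa [pvFlags] using h (false, false, false, false)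
  induction ps with
  | nil => intro f; simp
  | cons x xs ih =>
      intro f
      rw [List.foldl_cons, ih]
      simp [Bool.or_assoc]

-- ===== VERDICT (by name: the statement is the Claim_ definition above) =====
theorem identify_transition_trigger_py_spec : Claim_equal_identify_transition_trigger_py := by
  intro ps _
  unfold Spec_identify_transition_trigger_py identify_transition_trigger_py identify_transition_trigger_py_alt
  rw [pvFlags_eq ps]
  simp only [List.any_map, Function.comp_def]
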